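-- pv_equiv track=rewrite | github.com/loveyourdaddy/maya_retargeting | utils.py | select_joints
-- ===== SOURCE A (Python) =====
-- alter_joint_name = {
--      "Hips":["Pelvis", "LowerTorso"],
--      "Spine":["UpperTorso",],
--
--      "LeftShoulder": ["LFBXASC032Clavicle", "LeftUpperArm"],
--      "LeftArm":["LFBXASC032UpperArm", "LeftLowerArm"],
--      "LeftForeArm":["LFBXASC032Forearm"],
--      "LeftHand": ["LFBXASC032Hand"],
--
--      "RightShoulder":["RFBXASC032Clavicle", "RightUpperArm"],
--      "RightArm":["RFBXASC032UpperArm", "LeftUpperArm"],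
--      "RightForeArm":["RFBXASC032Forearm"],
--      "RightHand":["RFBXASC032Hand"],
--
--      "LeftUpLeg":['LFBXASC032Thigh'],
--      "LeftLeg":['LFBXASC032Calf'],
--      "LeftFoot":['LFBXASC032Foot'],
--      "LeftToeBase":['LFBXASC032Toe0'],
--
--      "RightUpLeg":['RFBXASC032Thigh'],
--      "RightLeg":['RFBXASC032Calf'],
--      "RightFoot":['RFBXASC032Foot'],
--      "RightToeBase":['RFBXASC032Toe0'],
--     }
--
-- def select_joints(joints, template_joints):
--     refined_joints = []
--     for template_joint in template_joints:
--         for joint in joints: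
--             # find alternative name
--             alter_joint = joint
--             for temp_name, alter_names in alter_joint_name.items():
--                 changed = False
--                 for alter_name in alter_names:
--                     if joint in alter_name or alter_name in joint:
--                         alter_joint = temp_name
--                         changed = True
--                         break
--                 if changed:
--                     break
--
--             # joint in template joint, not finger
--             if (template_joint.lower() in joint.lower() or joint.lower() in template_joint.lower() or \
--                 template_joint.lower() in alter_joint.lower() or alter_joint.lower() in template_joint.lower()) and \
--                 "Thumb" not in joint and \
--                 "Index" not in joint and \
--                 "Middle" not in joint and \
--                 "Ring" not in joint and \
--                 "Pinky" not in joint: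
--                 refined_joints.append(joint)
--                 break
--
--     return refined_joints
-- ===== SOURCE B (Python) =====
-- alter_joint_name = {
--      "Hips":["Pelvis", "LowerTorso"],
--      "Spine":["UpperTorso",],
--
--      "LeftShoulder": ["LFBXASC032Clavicle", "LeftUpperArm"],
--      "LeftArm":["LFBXASC032UpperArm", "LeftLowerArm"],
--      "LeftForeArm":["LFBXASC032Forearm"],
--      "LeftHand": ["LFBXASC032Hand"],
--
--      "RightShoulder":["RFBXASC032Clavicle", "RightUpperArm"],
--      "RightArm":["RFBXASC032UpperArm", "LeftUpperArm"],
--      "RightForeArm":["RFBXASC032Forearm"],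
--      "RightHand":["RFBXASC032Hand"],
--
--      "LeftUpLeg":['LFBXASC032Thigh'],
--      "LeftLeg":['LFBXASC032Calf'],
--      "LeftFoot":['LFBXASC032Foot'],
--      "LeftToeBase":['LFBXASC032Toe0'],
--
--      "RightUpLeg":['RFBXASC032Thigh'],
--      "RightLeg":['RFBXASC032Calf'],
--      "RightFoot":['RFBXASC032Foot'],
--      "RightToeBase":['RFBXASC032Toe0'],
--     }
--
-- # flattened (template_name, alter_name) pairs, in dict/item order
-- _ALTER_PAIRS = [(t, a) for t, alts in alter_joint_name.items() for a in alts]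
-- _FINGERS = ("Thumb", "Index", "Middle", "Ring", "Pinky")
--
--
-- def select_joints(joints, template_joints):
--     # index-first pass: one record per joint, computed once
--     records = []
--     for joint in joints:
--         alter = next((t for t, a in _ALTER_PAIRS if joint in a or a in joint), joint)
--         records.append((joint,
--                         joint.lower(),
--                         alter.lower(),
--                         any(f in joint for f in _FINGERS)))
--     # matching pass over the precomputed records
--     refined_joints = []
--     for template_joint in template_joints:
--         tl = template_joint.lower()
--         for joint, jl, al, finger in records:
--             if not finger and (tl in jl or jl in tl or tl in al or al in tl):
--                 refined_joints.append(joint)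
--                 break
--     return refined_joints
-- ===== Notes on version B (the rewrite author's own statement) =====
-- stated objective: faster
-- what changed: B flattens the alter-name dict once into (template,name) pairs and precomputes per joint a record (alter name via find-first over the pairs, lowercase forms, finger flag), so the matching pass is a flat scan over records instead of A's per-(template,joint) re-run of the nested dict loops with a 'changed' flag.
import Mathlib
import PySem

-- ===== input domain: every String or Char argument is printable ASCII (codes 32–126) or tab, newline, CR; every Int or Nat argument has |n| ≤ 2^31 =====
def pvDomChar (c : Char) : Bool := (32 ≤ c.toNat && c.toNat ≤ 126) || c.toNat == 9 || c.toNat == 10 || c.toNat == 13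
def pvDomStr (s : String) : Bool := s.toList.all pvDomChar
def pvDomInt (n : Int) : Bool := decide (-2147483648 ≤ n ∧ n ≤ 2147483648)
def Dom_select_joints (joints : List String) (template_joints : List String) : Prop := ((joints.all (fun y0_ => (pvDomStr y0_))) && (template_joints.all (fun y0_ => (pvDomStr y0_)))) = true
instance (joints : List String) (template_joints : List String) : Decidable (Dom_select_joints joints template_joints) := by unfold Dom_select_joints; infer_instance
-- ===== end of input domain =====

-- B precomputes, once per joint, its resolved alter name (via a flattened pair list),
-- lowercase form and finger flag, then matches templates against these records, resolving each joint once instead of once per (template, joint) pair (objective: faster).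

-- the module-level dict alter_joint_name (insertion order), shared constant of both modules
def pvAlterTable : List (String × List String) :=
  [ ("Hips", ["Pelvis", "LowerTorso"]),
    ("Spine", ["UpperTorso"]),
    ("LeftShoulder", ["LFBXASC032Clavicle", "LeftUpperArm"]),
    ("LeftArm", ["LFBXASC032UpperArm", "LeftLowerArm"]),
    ("LeftForeArm", ["LFBXASC032Forearm"]),
    ("LeftHand", ["LFBXASC032Hand"]),
    ("RightShoulder", ["RFBXASC032Clavicle", "RightUpperArm"]),
    ("RightArm", ["RFBXASC032UpperArm", "LeftUpperArm"]),
    ("RightForeArm", ["RFBXASC032Forearm"]),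
    ("RightHand", ["RFBXASC032Hand"]),
    ("LeftUpLeg", ["LFBXASC032Thigh"]),
    ("LeftLeg", ["LFBXASC032Calf"]),
    ("LeftFoot", ["LFBXASC032Foot"]),
    ("LeftToeBase", ["LFBXASC032Toe0"]),
    ("RightUpLeg", ["RFBXASC032Thigh"]),
    ("RightLeg", ["RFBXASC032Calf"]),
    ("RightFoot", ["RFBXASC032Foot"]),
    ("RightToeBase", ["RFBXASC032Toe0"]) ]

-- ===== PORT A =====
-- A's inner 'for alter_name in alter_names: … break' (the 'changed' flag is the early return)
def pvInnerA (joint : String) : List String → Bool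
  | [] => false
  | a :: rest =>
      if PySem.Str.isIn joint a || PySem.Str.isIn a joint then true
      else pvInnerA joint rest

-- A's 'for temp_name, alter_names in alter_joint_name.items(): … if changed: break'
def pvAlterA (joint : String) : List (String × List String) → String
  | [] => joint
  | (t, alts) :: rest =>
      if pvInnerA joint alts then t else pvAlterA joint rest

-- A's per-(template_joint, joint) condition, recomputing alter_joint in place
def pvCondA (template_joint joint : String) : Bool :=
  let alter := pvAlterA joint pvAlterTable
  PySem.Str.isIn (PySem.Str.lower template_joint) (PySem.Str.lower joint) ||
    PySem.Str.isIn (PySem.Str.lower joint) (PySem.Str.lower template_joint) ||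
    PySem.Str.isIn (PySem.Str.lower template_joint) (PySem.Str.lower alter) ||
    PySem.Str.isIn (PySem.Str.lower alter) (PySem.Str.lower template_joint) |>.and
    (!PySem.Str.isIn "Thumb" joint) |>.and (!PySem.Str.isIn "Index" joint) |>.and
    (!PySem.Str.isIn "Middle" joint) |>.and (!PySem.Str.isIn "Ring" joint) |>.and
    (!PySem.Str.isIn "Pinky" joint)

-- A's 'for joint in joints: … append; break'
def pvScanA (template_joint : String) : List String → Option String
  | [] => none
  | j :: rest => if pvCondA template_joint j then some j else pvScanA template_joint rest

def select_joints (joints : List String) (template_joints : List String) : List String :=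
  template_joints.foldl
    (fun refined tj =>
      match pvScanA tj joints with
      | some j => refined ++ [j]
      | none => refined) []

-- ===== PORT B =====
-- _ALTER_PAIRS = [(t, a) for t, alts in alter_joint_name.items() for a in alts]
def pvAlterPairs : List (String × String) :=
  pvAlterTable.flatMap (fun p => p.2.map (fun a => (p.1, a)))

def pvFingers : List String := ["Thumb", "Index", "Middle", "Ring", "Pinky"]

-- one record per joint: (joint, joint.lower(), alter.lower(), finger flag)
def pvRecord (joint : String) : String × String × String × Bool :=
  let alter :=
    ((pvAlterPairs.find? (fun q => PySem.Str.isIn joint q.2 || PySem.Str.isIn q.2 joint)).map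
      Prod.fst).getD joint
  (joint, PySem.Str.lower joint, PySem.Str.lower alter,
    pvFingers.any (fun f => PySem.Str.isIn f joint))

-- B's matching pass over the precomputed records
def pvScanB (tl : String) : List (String × String × String × Bool) → Option String
  | [] => none
  | (j, jl, al, finger) :: rest =>
      if !finger &&
          (PySem.Str.isIn tl jl || PySem.Str.isIn jl tl ||
            PySem.Str.isIn tl al || PySem.Str.isIn al tl) then some j
      else pvScanB tl rest

def select_joints_alt (joints : List String) (template_joints : List String) : List String :=
  let records := joints.map pvRecord
  template_joints.foldl
    (fun refined tj =>
      match pvScanB (PySem.Str.lower tj) records with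
      | some j => refined ++ [j]
      | none => refined) []

-- ===== PRECONDITION & SPEC =====
def Spec_select_joints (joints : List String) (template_joints : List String) (out : List String) : Prop := out = select_joints_alt joints template_joints
instance (joints : List String) (template_joints : List String) (out : List String) : Decidable (Spec_select_joints joints template_joints out) := by unfold Spec_select_joints; infer_instance

-- ===== CLAIM (what is proved, stated in full; the proofs are below) =====
def Claim_equal_select_joints : Prop := ∀ (joints : List String) (template_joints : List String), Dom_select_joints joints template_joints → Spec_select_joints joints template_joints (select_joints joints template_joints)

-- ===== LEMMAS AND PROOFS =====

-- A's inner flag loop succeeds iff find-first over the names succeeds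
theorem pvInner_eq_isSome (j : String) (as : List String) :
    pvInnerA j as =
      (as.find? (fun a => PySem.Str.isIn j a || PySem.Str.isIn a j)).isSome := by
  induction as with
  | nil => rfl
  | cons a rest ih =>
      cases h : (PySem.Chars.isIn j.toList a.toList || PySem.Chars.isIn a.toList j.toList) with
      | true => simp [pvInnerA, h]
      | false => simp [pvInnerA, h, ih]

-- find-first over a constant-key pair block = find-first over the names, tagged
theorem pvFind_map_pairs (j t : String) (as : List String) :
    (as.map (fun a => (t, a))).find?
        (fun q => PySem.Str.isIn j q.2 || PySem.Str.isIn q.2 j) =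
      (as.find? (fun a => PySem.Str.isIn j a || PySem.Str.isIn a j)).map
        (fun a => (t, a)) := by
  induction as with
  | nil => rfl
  | cons a rest ih =>
      cases h : (PySem.Chars.isIn j.toList a.toList || PySem.Chars.isIn a.toList j.toList) with
      | true => simp [h]
      | false => simp [h, Function.comp_def]

-- A's flag-and-break double loop computes exactly B's find-first over the flattened pairs
theorem pvAlter_eq_pairs (j : String) (L : List (String × List String)) :
    pvAlterA j L =
      (((L.flatMap (fun p => p.2.map (fun a => (p.1, a)))).find?
          (fun q => PySem.Str.isIn j q.2 || PySem.Str.isIn q.2 j)).map Prod.fst).getD j := by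
  induction L with
  | nil => rfl
  | cons hd tl ih =>
      obtain ⟨t, alts⟩ := hd
      rw [pvAlterA, List.flatMap_cons, List.find?_append, pvFind_map_pairs]
      by_cases h : pvInnerA j alts = true
      · have hs : (alts.find? (fun a => PySem.Str.isIn j a || PySem.Str.isIn a j)).isSome := by
          rw [← pvInner_eq_isSome]; exact h
        obtain ⟨a, ha⟩ := Option.isSome_iff_exists.1 hs
        rw [if_pos h, ha]; rfl
      · have hn : alts.find? (fun a => PySem.Str.isIn j a || PySem.Str.isIn a j) = none := by
          rw [← Option.not_isSome_iff_eq_none, ← pvInner_eq_isSome]; simpa using h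
        rw [if_neg h, hn, ih]; rfl

-- the two scan loops agree: A's inline recomputation = B's record lookup
theorem pvScan_eq (tj : String) (js : List String) :
    pvScanA tj js = pvScanB (PySem.Str.lower tj) (js.map pvRecord) := by
  induction js with
  | nil => simp [pvScanA, pvScanB]
  | cons j rest ih =>
      simp only [List.map_cons, pvScanA, pvScanB, pvRecord]
      have halter :
          pvAlterA j pvAlterTable =
            ((pvAlterPairs.find?
                (fun q => PySem.Str.isIn j q.2 || PySem.Str.isIn q.2 j)).map Prod.fst).getD j := by
        rw [pvAlter_eq_pairs]; rfl
      have hcond : pvCondA tj j =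
          (!(pvFingers.any (fun f => PySem.Str.isIn f j)) &&
            (PySem.Str.isIn (PySem.Str.lower tj)
                (PySem.Str.lower j) ||
              PySem.Str.isIn (PySem.Str.lower j) (PySem.Str.lower tj) ||
              PySem.Str.isIn (PySem.Str.lower tj)
                (PySem.Str.lower (((pvAlterPairs.find?
                    (fun q => PySem.Str.isIn j q.2 || PySem.Str.isIn q.2 j)).map
                      Prod.fst).getD j)) ||
              PySem.Str.isIn
                (PySem.Str.lower (((pvAlterPairs.find?
                    (fun q => PySem.Str.isIn j q.2 || PySem.Str.isIn q.2 j)).map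
                      Prod.fst).getD j))
                (PySem.Str.lower tj))) := by
        simp only [pvCondA, halter, pvFingers, List.any_cons, List.any_nil]
        cases PySem.Str.isIn "Thumb" j <;> cases PySem.Str.isIn "Index" j <;>
          cases PySem.Str.isIn "Middle" j <;> cases PySem.Str.isIn "Ring" j <;>
          cases PySem.Str.isIn "Pinky" j <;> simp
      rw [hcond, ih]

theorem select_joints_eq (joints template_joints : List String) :
    select_joints joints template_joints = select_joints_alt joints template_joints := by
  unfold select_joints select_joints_alt
  simp only [pvScan_eq]

-- ===== VERDICT (by name: the statement is the Claim_ definition above) =====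
theorem select_joints_spec : Claim_equal_select_joints := by
  intro joints template_joints _
  unfold Spec_select_joints
  exact select_joints_eq joints template_joints
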